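-- pv_equiv track=rewrite | github.com/i079024/agentapi1 | services/reporting_service.py | _determine_generation_method
-- ===== SOURCE A (Python) =====
-- from typing import Dict, List, Any
--
-- def _determine_generation_method(tests: List[Dict[str, Any]]) -> str:
--     """Determine how tests were generated"""
--     if not tests:
--         return "none"
--
--     methods = set(test.get("generated_by", "unknown") for test in tests)
--     if "llm" in methods:
--         return "llm_assisted"
--     elif "fallback" in methods:
--         return "pattern_based"
--     else:
--         return "unknown"
-- ===== SOURCE B (Python) =====
-- from typing import Dict, List, Any
--
-- _RANK_TO_METHOD = ("unknown", "pattern_based", "llm_assisted")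
--
-- def _rank(method: str) -> int:
--     if method == "llm":
--         return 2
--     if method == "fallback":
--         return 1
--     return 0
--
-- def _determine_generation_method(tests: List[Dict[str, Any]]) -> str:
--     """Determine how tests were generated (single pass, max priority accumulator)"""
--     if not tests:
--         return "none"
--     best = 0
--     for test in tests:
--         r = _rank(test.get("generated_by", "unknown"))
--         if r > best:
--             best = r
--     return _RANK_TO_METHOD[best]
-- ===== Notes on version B (the rewrite author's own statement) =====
-- stated objective: alternative
-- what changed: B replaces building a set of methods and querying it twice by a single pass that folds a numeric priority (llm=2, fallback=1, other=0) to its maximum and indexes the answer from a rank table.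
import Mathlib
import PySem

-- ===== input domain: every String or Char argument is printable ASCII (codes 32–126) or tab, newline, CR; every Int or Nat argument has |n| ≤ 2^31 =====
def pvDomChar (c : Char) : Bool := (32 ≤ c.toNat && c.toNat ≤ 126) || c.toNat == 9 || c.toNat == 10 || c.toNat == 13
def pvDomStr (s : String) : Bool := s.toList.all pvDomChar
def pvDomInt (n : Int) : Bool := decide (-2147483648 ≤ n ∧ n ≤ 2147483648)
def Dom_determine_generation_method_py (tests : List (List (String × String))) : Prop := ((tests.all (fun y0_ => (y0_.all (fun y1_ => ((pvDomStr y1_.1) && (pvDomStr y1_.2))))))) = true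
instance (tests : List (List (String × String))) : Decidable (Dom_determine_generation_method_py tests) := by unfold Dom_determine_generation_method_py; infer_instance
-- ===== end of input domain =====

-- B replaces set-build-then-query by one pass folding a numeric priority to its maximum (objective: alternative).

-- ===== PORT A =====
def determine_generation_method_py (tests : List (List (String × String))) : String :=
  if tests = [] then "none"
  else
    let methods : PySem.Set String :=
      PySem.Set.ofList (tests.map (fun test => PySem.Dict.getD ⟨test⟩ "generated_by" "unknown"))
    if PySem.Set.contains methods "llm" then "llm_assisted"
    else if PySem.Set.contains methods "fallback" then "pattern_based"
    else "unknown"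

-- ===== PORT B =====
-- rank of a generation method: llm=2, fallback=1, anything else 0
def pvRank (method : String) : Nat :=
  if method == "llm" then 2
  else if method == "fallback" then 1
  else 0

-- _RANK_TO_METHOD[best]; best ∈ {0,1,2} always, so the index branch is exact
def pvRankToMethod (best : Nat) : String :=
  if best = 0 then "unknown"
  else if best = 1 then "pattern_based"
  else "llm_assisted"

def determine_generation_method_py_alt (tests : List (List (String × String))) : String :=
  if tests = [] then "none"
  else
    let best := tests.foldl
      (fun best test =>
        let r := pvRank (PySem.Dict.getD ⟨test⟩ "generated_by" "unknown")
        if r > best then r else best) 0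
    pvRankToMethod best

-- ===== PRECONDITION & SPEC =====
def Spec_determine_generation_method_py (tests : List (List (String × String))) (out : String) : Prop := out = determine_generation_method_py_alt tests
instance (tests : List (List (String × String))) (out : String) : Decidable (Spec_determine_generation_method_py tests out) := by unfold Spec_determine_generation_method_py; infer_instance

-- ===== CLAIM (what is proved, stated in full; the proofs are below) =====
def Claim_equal_determine_generation_method_py : Prop := ∀ (tests : List (List (String × String))), Dom_determine_generation_method_py tests → Spec_determine_generation_method_py tests (determine_generation_method_py tests)

-- ===== LEMMAS AND PROOFS =====

-- membership in the set of mapped values equals an any-scan over the list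
theorem pv_contains_ofList_map_eq_any {α β : Type} [DecidableEq β] (l : List α) (f : α → β) (x : β) :
    PySem.Set.contains (PySem.Set.ofList (l.map f)) x = l.any (fun a => f a == x) := by
  simp only [PySem.Set.contains]
  cases hb : l.any (fun a => f a == x)
  · simp only [List.any_eq_false] at hb
    simp only [List.contains_eq_mem, decide_eq_false_iff_not, PySem.Set.mem_ofList, List.mem_map,
      not_exists, not_and]
    intro a ha h
    exact absurd (hb a ha) (by simp [h])
  · simp only [List.any_eq_true] at hb
    obtain ⟨a, ha, hfa⟩ := hb
    simp only [List.contains_eq_mem, decide_eq_true_eq, PySem.Set.mem_ofList, List.mem_map]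
    exact ⟨a, ha, beq_iff_eq.mp hfa⟩

-- the fold's result is max of the accumulator and the classified maximum rank of the list
theorem pv_fold_rank (l : List (List (String × String))) (acc : Nat) :
    l.foldl (fun best test =>
        let r := pvRank (PySem.Dict.getD ⟨test⟩ "generated_by" "unknown")
        if r > best then r else best) acc
    = max acc
        (if l.any (fun t => PySem.Dict.getD ⟨t⟩ "generated_by" "unknown" == "llm") then 2
         else if l.any (fun t => PySem.Dict.getD ⟨t⟩ "generated_by" "unknown" == "fallback") then 1
         else 0) := by
  induction l generalizing acc with
  | nil => simp
  | cons h t ih =>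
    simp only [List.foldl_cons, List.any_cons]
    rw [ih]
    by_cases h1 : PySem.Dict.getD ⟨h⟩ "generated_by" "unknown" = "llm" <;>
      by_cases h2 : PySem.Dict.getD ⟨h⟩ "generated_by" "unknown" = "fallback" <;>
        simp [h1, h2, pvRank] <;> split_ifs <;> omega

-- ===== VERDICT (by name: the statement is the Claim_ definition above) =====
theorem determine_generation_method_py_spec : Claim_equal_determine_generation_method_py := by
  intro tests _
  unfold Spec_determine_generation_method_py determine_generation_method_py determine_generation_method_py_alt
  by_cases h : tests = []
  · simp [h]
  · simp only [h, if_false]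
    rw [pv_contains_ofList_map_eq_any, pv_contains_ofList_map_eq_any, pv_fold_rank]
    by_cases h1 : tests.any (fun t => PySem.Dict.getD ⟨t⟩ "generated_by" "unknown" == "llm") <;>
      by_cases h2 : tests.any (fun t => PySem.Dict.getD ⟨t⟩ "generated_by" "unknown" == "fallback") <;>
        simp [h1, h2, pvRankToMethod]
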